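-- pv_equiv track=rewrite | github.com/Arsen1302/Code-copy-detector | TestData/solutions/problem_1294_5_1.py | solution_1294_5_1
-- ===== SOURCE A (Python) =====
-- def solution_1294_5_1(s,subStr,removed):
--     i,j = 0,0
--     while i < len(s) and j < len(subStr):
--         if s[i] != subStr[j] or i in removed:
--             i += 1
--             continue
--         i += 1
--         j += 1
--     return j == len(subStr)
-- ===== SOURCE B (Python) =====
-- def solution_1294_5_1(s, subStr, removed):
--     # Build an index: for each character, the (increasing) list of its allowed
--     # positions in s; then match subStr by jumping through the index with a
--     # per-character cursor, tracking only the last matched position.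
--     removed_set = set(removed)
--     pos = {}
--     for i, c in enumerate(s):
--         if i not in removed_set:
--             pos.setdefault(c, []).append(i)
--     last = -1
--     idx = {}
--     for ch in subStr:
--         lst = pos.get(ch, [])
--         k = idx.get(ch, 0)
--         while k < len(lst) and lst[k] <= last:
--             k += 1
--         if k == len(lst):
--             return False
--         last = lst[k]
--         idx[ch] = k + 1
--     return True
-- ===== Notes on version B (the rewrite author's own statement) =====
-- stated objective: alternative
-- what changed: Replaces A's interleaved two-pointer scan of s (with an O(|removed|) list membership test at every step) by building a hash index char -> increasing list of allowed positions once (with removed as a set), then matching subStr through per-character cursors into that index, tracking only the last matched position.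
import Mathlib
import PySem

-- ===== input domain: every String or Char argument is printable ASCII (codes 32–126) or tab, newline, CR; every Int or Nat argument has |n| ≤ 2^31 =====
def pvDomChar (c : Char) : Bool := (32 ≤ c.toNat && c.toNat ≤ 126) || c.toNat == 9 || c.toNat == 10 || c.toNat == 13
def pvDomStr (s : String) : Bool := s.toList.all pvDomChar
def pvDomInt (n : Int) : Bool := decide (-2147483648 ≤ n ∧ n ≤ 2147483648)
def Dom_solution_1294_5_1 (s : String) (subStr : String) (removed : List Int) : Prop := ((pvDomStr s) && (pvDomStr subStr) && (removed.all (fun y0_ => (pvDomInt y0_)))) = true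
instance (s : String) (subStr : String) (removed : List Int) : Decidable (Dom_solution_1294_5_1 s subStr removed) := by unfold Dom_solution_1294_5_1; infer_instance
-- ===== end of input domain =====

-- B replaces A's interleaved two-pointer scan (with a per-step membership scan of
-- `removed`) by a hash index char -> list of allowed positions built once, then
-- matching subStr through index lookups tracking only the last matched position.


-- ===== PORT A =====
-- the while loop: i,j two pointers; i always advances, so recursion on s.length - i
def pvAGo (sl sub : List Char) (removed : List Int) (i j : Nat) : Bool :=
  if h : i < sl.length ∧ j < sub.length then
    if sl[i]'h.1 ≠ sub[j]'h.2 ∨ (i : Int) ∈ removed then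
      pvAGo sl sub removed (i + 1) j
    else
      pvAGo sl sub removed (i + 1) (j + 1)
  else
    j == sub.length
termination_by sl.length - i
decreasing_by all_goals omega

def solution_1294_5_1 (s : String) (subStr : String) (removed : List Int) : Bool :=
  pvAGo s.toList subStr.toList removed 0 0

-- ===== PORT B =====
-- pos.setdefault(c, []).append(i)  over enumerate(s) with i not in removed_set
def pvBuildPos (pairs : List (Int × Char)) : PySem.Dict Char (List Int) :=
  pairs.foldl (fun d p => d.modify p.2 [] (· ++ [p.1])) PySem.Dict.empty

-- while k < len(lst) and lst[k] <= last: k += 1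
def pvScan (last : Int) (lst : List Int) (k : Nat) : Nat :=
  if h : k < lst.length then
    if lst[k] ≤ last then pvScan last lst (k + 1) else k
  else k
termination_by lst.length - k
decreasing_by omega

-- the matching loop over subStr, carrying `last` and the per-character cursors `idx`
def pvMatchLoop2 (pos : PySem.Dict Char (List Int)) :
    List Char → Int → PySem.Dict Char Nat → Bool
  | [], _, _ => true
  | ch :: rest, last, idx =>
    if h : pvScan last (pos.getD ch []) (idx.getD ch 0) < (pos.getD ch []).length then
      pvMatchLoop2 pos rest
        ((pos.getD ch [])[pvScan last (pos.getD ch []) (idx.getD ch 0)]'h)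
        (idx.insert ch (pvScan last (pos.getD ch []) (idx.getD ch 0) + 1))
    else false

def solution_1294_5_1_alt (s : String) (subStr : String) (removed : List Int) : Bool :=
  let removedSet := PySem.Set.ofList removed
  let pos := pvBuildPos ((PySem.List.enumerate s.toList).filter
    (fun p => !(PySem.Set.contains removedSet p.1)))
  pvMatchLoop2 pos subStr.toList (-1) PySem.Dict.empty

-- ===== PRECONDITION & SPEC =====
def Spec_solution_1294_5_1 (s : String) (subStr : String) (removed : List Int) (out : Bool) : Prop := out = solution_1294_5_1_alt s subStr removed
instance (s : String) (subStr : String) (removed : List Int) (out : Bool) : Decidable (Spec_solution_1294_5_1 s subStr removed out) := by unfold Spec_solution_1294_5_1; infer_instance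

-- ===== CLAIM (what is proved, stated in full; the proofs are below) =====
def Claim_equal_solution_1294_5_1 : Prop := ∀ (s : String) (subStr : String) (removed : List Int), Dom_solution_1294_5_1 s subStr removed → Spec_solution_1294_5_1 s subStr removed (solution_1294_5_1 s subStr removed)

-- ===== LEMMAS AND PROOFS =====

-- proof-layer helpers: B without cursors (pvNext = first allowed position above last)
def pvNext (last : Int) : List Int → Option Int
  | [] => none
  | p :: ps => if last < p then some p else pvNext last ps

def pvMatchLoop (pos : PySem.Dict Char (List Int)) : List Char → Int → Bool
  | [], _ => true
  | ch :: rest, last =>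
    match pvNext last (pos.getD ch []) with
    | none => false
    | some nxt => pvMatchLoop pos rest nxt

-- the greedy consumption that A's pointer loop performs over the filtered characters
def pvConsume : List Char → List Char → Bool
  | [], _ => true
  | _ :: _, [] => false
  | t :: ts, c :: cs => if c = t then pvConsume ts cs else pvConsume (t :: ts) cs

theorem pvConsume_cons_cons (t c : Char) (ts cs : List Char) :
    pvConsume (t :: ts) (c :: cs) = if c = t then pvConsume ts cs else pvConsume (t :: ts) cs := rfl

theorem pvConsume_cons_nil (t : Char) (ts : List Char) : pvConsume (t :: ts) [] = false := rfl

theorem pvConsume_nil (cs : List Char) : pvConsume [] cs = true := by cases cs <;> rfl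

theorem enumerate_drop {α : Type} (xs : List α) (k : Nat) (st : Int) :
    (PySem.List.enumerate xs st).drop k = PySem.List.enumerate (xs.drop k) (st + k) := by
  induction xs generalizing k st with
  | nil => simp [PySem.List.enumerate]
  | cons x xs ih =>
    cases k with
    | zero => simp
    | succ k =>
      simp [PySem.List.enumerate_cons, List.drop_succ_cons, ih k (st + 1)]
      ring_nf

theorem pvAGo_eq (sl sub : List Char) (removed : List Int) :
    ∀ i j, j ≤ sub.length →
      pvAGo sl sub removed i j =
        pvConsume (sub.drop j)
          ((((PySem.List.enumerate sl).drop i).filter (fun p => ¬ p.1 ∈ removed)).map (·.2)) := by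
  intro i j hj
  by_cases hi : i < sl.length
  · have hdrop : (PySem.List.enumerate sl (0 : Int)).drop i
        = ((i : Int), sl[i]) :: (PySem.List.enumerate sl (0 : Int)).drop (i + 1) := by
      rw [enumerate_drop, enumerate_drop]
      have : sl.drop i = sl[i] :: sl.drop (i + 1) := (List.getElem_cons_drop hi).symm
      rw [this, PySem.List.enumerate_cons]
      norm_num
    by_cases hjlt : j < sub.length
    · have hsubd : sub.drop j = sub[j] :: sub.drop (j + 1) :=
        (List.getElem_cons_drop hjlt).symm
      rw [pvAGo]
      rw [dif_pos ⟨hi, hjlt⟩]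
      by_cases hrem : (i : Int) ∈ removed
      · rw [if_pos (Or.inr hrem)]
        rw [pvAGo_eq sl sub removed (i + 1) j hj, hdrop]
        simp [hrem]
      · by_cases hne : sl[i] = sub[j]
        · rw [if_neg (by simp [hne, hrem])]
          rw [pvAGo_eq sl sub removed (i + 1) (j + 1) (by omega), hdrop, hsubd]
          simp [hrem, hne]
          rw [hsubd, pvConsume_cons_cons, if_pos rfl]
        · rw [if_pos (Or.inl hne)]
          rw [pvAGo_eq sl sub removed (i + 1) j hj, hdrop, hsubd]
          simp [hrem]
          rw [hsubd, pvConsume_cons_cons, if_neg hne]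
    · have hje : j = sub.length := by omega
      rw [pvAGo, dif_neg (by omega)]
      simp [hje, List.drop_length, pvConsume]
  · have hdrop : (PySem.List.enumerate sl (0 : Int)).drop i = [] := by
      apply List.drop_eq_nil_of_le
      simp [PySem.List.length_enumerate]; omega
    rw [pvAGo, dif_neg (by omega), hdrop]
    by_cases hje : j = sub.length
    · simp [hje, List.drop_length, pvConsume]
    · have : j < sub.length := by omega
      have : sub.drop j = sub[j] :: sub.drop (j + 1) :=
        (List.getElem_cons_drop this).symm
      rw [this]
      simp only [List.filter_nil, List.map_nil, pvConsume_cons_nil]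
      simp [hje]
termination_by i _ _ => sl.length - i
decreasing_by all_goals omega

-- the built dict maps c to the positions of c in the pairs, in order
theorem pvBuildPos_getD (P : List (Int × Char)) :
    ∀ (d : PySem.Dict Char (List Int)) (c : Char),
      (P.foldl (fun d p => d.modify p.2 [] (· ++ [p.1])) d).getD c []
        = d.getD c [] ++ (P.filter (fun p => p.2 = c)).map (·.1) := by
  induction P with
  | nil => intro d c; simp
  | cons p P ih =>
    intro d c
    simp only [List.foldl_cons, ih]
    rw [PySem.Dict.getD_modify]
    by_cases h : c = p.2
    · simp [h]
    · simp [h, Ne.symm h]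

theorem pvNext_some (last : Int) (l : List Int) (i : Int) (h : pvNext last l = some i) :
    last < i ∧ i ∈ l := by
  induction l with
  | nil => simp [pvNext] at h
  | cons x xs ih =>
    rw [pvNext] at h
    split_ifs at h with hx
    · cases h; exact ⟨hx, List.mem_cons_self⟩
    · rcases ih h with ⟨h1, h2⟩; exact ⟨h1, List.mem_cons_of_mem _ h2⟩

-- dropping a pair whose index is already ≤ last does not change the match
theorem pvMatchLoop_skip (p : Int × Char) (P : List (Int × Char)) :
    ∀ (sub : List Char) (last : Int), p.1 ≤ last →
      pvMatchLoop (pvBuildPos (p :: P)) sub last = pvMatchLoop (pvBuildPos P) sub last := by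
  intro sub
  induction sub with
  | nil => intro last _; rfl
  | cons ch rest ih =>
    intro last hle
    rw [pvMatchLoop, pvMatchLoop]
    have hg : (pvBuildPos (p :: P)).getD ch [] =
        (((p :: P).filter (fun q => q.2 = ch)).map (·.1)) := by
      simpa using pvBuildPos_getD (p :: P) PySem.Dict.empty ch
    have hg' : (pvBuildPos P).getD ch [] = ((P.filter (fun q => q.2 = ch)).map (·.1)) := by
      simpa using pvBuildPos_getD P PySem.Dict.empty ch
    have hsame : pvNext last ((pvBuildPos (p :: P)).getD ch [])
        = pvNext last ((pvBuildPos P).getD ch []) := by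
      rw [hg, hg']
      by_cases hch : p.2 = ch
      · simp only [List.filter_cons, hch, decide_true, if_true, List.map_cons]
        rw [pvNext, if_neg (by omega)]
      · simp [hch]
    rw [hsame]
    cases hnx : pvNext last ((pvBuildPos P).getD ch []) with
    | none => rfl
    | some nxt =>
      rcases pvNext_some last _ nxt hnx with ⟨hlt, _⟩
      exact ih nxt (by omega)

-- MAIN: greedy consumption over the suffix of P above `last` equals B's index matching
theorem pvMain (P : List (Int × Char)) (hP : P.Pairwise (fun a b => a.1 < b.1)) :
    ∀ (sub : List Char) (last : Int),
      pvConsume sub ((P.filter (fun p => decide (last < p.1))).map (·.2))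
        = pvMatchLoop (pvBuildPos P) sub last := by
  induction P with
  | nil =>
    intro sub last
    cases sub with
    | nil => rfl
    | cons ch rest =>
      simp only [List.filter_nil, List.map_nil, pvConsume_cons_nil]
      rw [pvMatchLoop]
      simp [pvBuildPos, PySem.Dict.getD_empty, pvNext]
  | cons p P ih =>
    rcases List.pairwise_cons.mp hP with ⟨hhead, hP'⟩
    intro sub last
    cases sub with
    | nil => exact (pvConsume_nil _).trans rfl
    | cons ch rest =>
      have hg : (pvBuildPos (p :: P)).getD ch [] =
          (((p :: P).filter (fun q => q.2 = ch)).map (·.1)) := by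
        simpa using pvBuildPos_getD (p :: P) PySem.Dict.empty ch
      rw [pvMatchLoop, hg]
      by_cases hlast : last < p.1
      · by_cases hch : p.2 = ch
        · -- head is kept and matches: both take it
          have hfilt : P.filter (fun q => decide (last < q.1)) = P :=
            List.filter_eq_self.mpr (fun q hq => by
              have := hhead q hq; simp; omega)
          have hfilt' : P.filter (fun q => decide (p.1 < q.1)) = P :=
            List.filter_eq_self.mpr (fun q hq => by
              have := hhead q hq; simp; omega)
          simp only [List.filter_cons, hlast, decide_true, if_true, List.map_cons, hch,
            decide_true]
          rw [pvConsume_cons_cons, if_pos rfl, hfilt]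
          rw [pvNext, if_pos hlast]
          rw [show (match some p.1 with
              | none => false
              | some nxt => pvMatchLoop (pvBuildPos (p :: P)) rest nxt)
              = pvMatchLoop (pvBuildPos (p :: P)) rest p.1 from rfl]
          rw [pvMatchLoop_skip p P rest p.1 (le_refl _)]
          rw [← ih hP' rest p.1, hfilt']
        · -- head kept but wrong char: greedy skips it, index never lists it
          have hfc : (p :: P).filter (fun q => q.2 = ch) = P.filter (fun q => q.2 = ch) := by
            simp [hch]
          have hfc2 : (p :: P).filter (fun q => decide (last < q.1))
              = p :: P.filter (fun q => decide (last < q.1)) := by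
            simp [hlast]
          rw [hfc2, List.map_cons, pvConsume_cons_cons, if_neg hch]
          rw [ih hP' (ch :: rest) last, pvMatchLoop, hfc]
          have hg' : (pvBuildPos P).getD ch [] = ((P.filter (fun q => q.2 = ch)).map (·.1)) := by
            simpa using pvBuildPos_getD P PySem.Dict.empty ch
          rw [hg']
          cases hnx : pvNext last ((P.filter (fun q => q.2 = ch)).map (·.1)) with
          | none => rfl
          | some nxt =>
            rcases pvNext_some last _ nxt hnx with ⟨_, hmem⟩
            rcases List.mem_map.mp hmem with ⟨q, hq, hq1⟩
            have hqP : q ∈ P := List.mem_of_mem_filter hq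
            have : p.1 < nxt := by rw [← hq1]; exact hhead q hqP
            exact (pvMatchLoop_skip p P rest nxt (by omega)).symm
      · -- head below last: both ignore it
        have hle : p.1 ≤ last := by omega
        have hfcL : (p :: P).filter (fun q => decide (last < q.1))
            = P.filter (fun q => decide (last < q.1)) := by
          simp [hlast]
        rw [hfcL, ih hP' (ch :: rest) last, ← pvMatchLoop_skip p P (ch :: rest) last hle,
          pvMatchLoop, hg]

-- positions skipped by the scan are all ≤ last
theorem pvScan_prefix_le (last : Int) (lst : List Int) (k : Nat) :
    ∀ j (hj : j < lst.length), k ≤ j → j < pvScan last lst k → lst[j] ≤ last := by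
  intro j hj hkj hjs
  rw [pvScan] at hjs
  split_ifs at hjs with h1 h2
  · by_cases hjk : j = k
    · subst hjk; exact h2
    · exact pvScan_prefix_le last lst (k + 1) j hj (by omega) hjs
  · omega
  · omega
termination_by lst.length - k
decreasing_by omega

-- a prefix of entries ≤ last can be dropped before searching
theorem pvNext_drop (last : Int) (lst : List Int) :
    ∀ k, (∀ j (hj : j < lst.length), j < k → lst[j] ≤ last) →
      pvNext last lst = pvNext last (lst.drop k) := by
  induction lst with
  | nil => intro k _; simp
  | cons x xs ih =>
    intro k hk
    cases k with
    | zero => simp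
    | succ k =>
      have hx : x ≤ last := by simpa using hk 0 (by simp) (by omega)
      rw [List.drop_succ_cons, pvNext, if_neg (by omega)]
      exact ih k (fun j hj hjk => by simpa using hk (j + 1) (by simpa using hj) (by omega))

-- the while-scan finds exactly the entry pvNext finds in the dropped suffix
theorem pvNext_drop_scan (last : Int) (lst : List Int) (k : Nat) :
    pvNext last (lst.drop k) = lst[pvScan last lst k]? := by
  by_cases h1 : k < lst.length
  · have hdk : lst.drop k = lst[k] :: lst.drop (k + 1) := (List.getElem_cons_drop h1).symm
    rw [pvScan, dif_pos h1]
    by_cases h2 : lst[k] ≤ last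
    · rw [if_pos h2, hdk, pvNext, if_neg (by omega)]
      exact pvNext_drop_scan last lst (k + 1)
    · rw [if_neg h2, hdk, pvNext, if_pos (by omega)]
      exact (List.getElem?_eq_getElem h1).symm
  · rw [List.drop_eq_nil_of_le (by omega), pvScan, dif_neg h1]
    rw [List.getElem?_eq_none (by omega)]
    rfl
termination_by lst.length - k
decreasing_by omega

-- B's cursor loop computes the cursor-free match, given that all entries below
-- each cursor are ≤ last
theorem pvMatchLoop2_eq (pos : PySem.Dict Char (List Int)) :
    ∀ (sub : List Char) (last : Int) (idx : PySem.Dict Char Nat),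
      (∀ ch j (hj : j < (pos.getD ch []).length),
        j < idx.getD ch 0 → (pos.getD ch [])[j] ≤ last) →
      pvMatchLoop2 pos sub last idx = pvMatchLoop pos sub last := by
  intro sub
  induction sub with
  | nil => intro last idx _; rfl
  | cons ch rest ih =>
    intro last idx hinv
    rw [pvMatchLoop2, pvMatchLoop]
    have hnext : pvNext last (pos.getD ch [])
        = (pos.getD ch [])[pvScan last (pos.getD ch []) (idx.getD ch 0)]? := by
      rw [pvNext_drop last (pos.getD ch []) (idx.getD ch 0)
        (fun j hj hjk => hinv ch j hj hjk)]
      exact pvNext_drop_scan last (pos.getD ch []) (idx.getD ch 0)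
    by_cases h : pvScan last (pos.getD ch []) (idx.getD ch 0) < (pos.getD ch []).length
    · rw [dif_pos h]
      have hsome : pvNext last (pos.getD ch [])
          = some ((pos.getD ch [])[pvScan last (pos.getD ch []) (idx.getD ch 0)]'h) := by
        rw [hnext]; exact List.getElem?_eq_getElem h
      rw [hsome]
      have hlastlt := (pvNext_some last (pos.getD ch []) _ hsome).1
      apply ih
      intro ch' j hj hjlt
      rw [PySem.Dict.getD_insert] at hjlt
      by_cases hc : ch' = ch
      · subst hc
        rw [if_pos rfl] at hjlt
        by_cases hjr : j = pvScan last (pos.getD ch' []) (idx.getD ch' 0)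
        · subst hjr; exact le_refl _
        · by_cases hjk0 : j < idx.getD ch' 0
          · exact le_trans (hinv ch' j hj hjk0) (le_of_lt hlastlt)
          · exact le_trans
              (pvScan_prefix_le last (pos.getD ch' []) (idx.getD ch' 0) j hj
                (by omega) (by omega))
              (le_of_lt hlastlt)
      · rw [if_neg hc] at hjlt
        exact le_trans (hinv ch' j hj hjlt) (le_of_lt hlastlt)
    · rw [dif_neg h]
      have hnone : pvNext last (pos.getD ch []) = none := by
        rw [hnext]; exact List.getElem?_eq_none (by omega)
      rw [hnone]

-- ===== VERDICT (by name: the statement is the Claim_ definition above) =====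
theorem solution_1294_5_1_spec : Claim_equal_solution_1294_5_1 := by
  intro s subStr removed _
  unfold Spec_solution_1294_5_1 solution_1294_5_1 solution_1294_5_1_alt
  rw [pvAGo_eq s.toList subStr.toList removed 0 0 (by omega)]
  simp only [List.drop_zero]
  have hfiltcong :
      (PySem.List.enumerate s.toList).filter (fun p => ¬ p.1 ∈ removed)
        = (PySem.List.enumerate s.toList).filter
            (fun p => !(PySem.Set.contains (PySem.Set.ofList removed) p.1)) := by
    apply List.filter_congr
    intro p _
    simp [PySem.Set.contains, PySem.Set.mem_ofList]
  rw [hfiltcong]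
  set P := (PySem.List.enumerate s.toList).filter
      (fun p => !(PySem.Set.contains (PySem.Set.ofList removed) p.1)) with hPdef
  have hPpw : P.Pairwise (fun a b => a.1 < b.1) :=
    (PySem.List.pairwise_lt_enumerate s.toList 0).filter _
  have hfiltself : P.filter (fun p => decide ((-1 : Int) < p.1)) = P := by
    apply List.filter_eq_self.mpr
    intro q hq
    have hq' : q ∈ PySem.List.enumerate s.toList 0 := List.mem_of_mem_filter hq
    rcases (PySem.List.mem_enumerate_iff s.toList 0 q).mp hq' with ⟨k, hk, hkeq⟩
    simp [hkeq]
    omega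
  have hm := pvMain P hPpw subStr.toList (-1)
  rw [hfiltself] at hm
  have hm2 : pvMatchLoop2 (pvBuildPos P) subStr.toList (-1) PySem.Dict.empty
      = pvMatchLoop (pvBuildPos P) subStr.toList (-1) := by
    apply pvMatchLoop2_eq
    intro ch j hj hjlt
    rw [PySem.Dict.getD_empty] at hjlt
    omega
  exact hm.trans hm2.symm
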